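-- pv_equiv track=rewrite | github.com/peteryesh/optcg-project | effect_interpreter.py | parse_effect
-- ===== SOURCE A (Python) =====
-- def parse_effect(effect):
--     words = []
--     i = 0
--     word = ""
--     grouped_text = False
--     open_bracket = False
--     while i < len(effect):
--         if effect[i] in ["[", "<", "{", "("] and not open_bracket:
--             grouped_text = True
--             open_bracket = True
--         elif effect[i] in ["]", ">", "}" , ")"] and open_bracket:
--             grouped_text = False
--             open_bracket = False
--         elif effect[i] == "\"" and not open_bracket:
--             grouped_text = not grouped_text
--
--         if effect[i] == " " and not grouped_text:
--             words.append(word)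
--             word = ""
--         elif not effect[i] in [".", ",", ";", ":", "!", "?"]:
--             word += effect[i].upper()
--
--         if i == len(effect) - 1:
--             words.append(word)
--
--         i += 1
--
--     return words
-- ===== SOURCE B (Python) =====
-- def _make_token(seg):
--     return "".join(c.upper() for c in seg if c not in ".,;:!?")
--
--
-- def parse_effect(effect):
--     if not effect:
--         return []
--     # pass 1: mark for each position whether it is inside a bracket group or quotes
--     grouped = []
--     g = False
--     open_bracket = False
--     for c in effect:
--         if c in "[<{(" and not open_bracket:
--             g = True
--             open_bracket = True
--         elif c in "]>})" and open_bracket: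
--             g = False
--             open_bracket = False
--         elif c == '"' and not open_bracket:
--             g = not g
--         grouped.append(g)
--     # pass 2: split at ungrouped spaces (keeping empty segments), build each token
--     words = []
--     seg = []
--     for i, c in enumerate(effect):
--         if c == " " and not grouped[i]:
--             words.append(_make_token(seg))
--             seg = []
--         else:
--             seg.append(c)
--     words.append(_make_token(seg))
--     return words
-- ===== Notes on version B (the rewrite author's own statement) =====
-- stated objective: faster
-- what changed: Replaces A's single-pass state machine that interleaves grouping state, punctuation stripping and char-by-char word building (quadratic 'word += c' string concatenation) with two passes: a scan marking which positions are grouped, then a split into raw segments at ungrouped spaces, each token built at once by a single filter+uppercase join.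
import Mathlib
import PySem

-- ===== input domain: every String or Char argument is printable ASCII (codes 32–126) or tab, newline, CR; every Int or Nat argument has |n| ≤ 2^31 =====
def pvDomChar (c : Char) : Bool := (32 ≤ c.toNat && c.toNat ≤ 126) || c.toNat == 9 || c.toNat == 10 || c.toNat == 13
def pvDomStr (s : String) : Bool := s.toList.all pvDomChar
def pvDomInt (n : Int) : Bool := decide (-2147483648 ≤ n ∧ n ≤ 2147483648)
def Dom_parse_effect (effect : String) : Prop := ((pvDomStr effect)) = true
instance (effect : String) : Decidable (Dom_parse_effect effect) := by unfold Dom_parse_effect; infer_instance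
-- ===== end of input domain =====

-- B re-implements A as two passes (grouping flags, then segment split with one join per token), avoiding A's repeated string concatenation; measured faster.

-- ===== PORT A =====
-- A's bracket/quote state update (the first if/elif/elif chain), returning (grouped_text, open_bracket)
def pvUpdA (c : Char) (g ob : Bool) : Bool × Bool :=
  if c ∈ (['[', '<', '{', '('] : List Char) ∧ ob = false then (true, true)
  else if c ∈ ([']', '>', '}', ')'] : List Char) ∧ ob = true then (false, false)
  else if c = '"' ∧ ob = false then (!g, ob)
  else (g, ob)

-- the while loop; word is the accumulated word as chars, 'rest = []' is A's 'i == len(effect) - 1'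
def pvLoopA : List Char → Bool → Bool → List Char → List String → List String
  | [], _, _, _, words => words
  | c :: rest, g, ob, word, words =>
    let s := pvUpdA c g ob
    let p : List Char × List String :=
      if c = ' ' ∧ s.1 = false then ([], words ++ [String.mk word])
      else if c ∈ (['.', ',', ';', ':', '!', '?'] : List Char) then (word, words)
      else (word ++ [PySem.Chars.upperChar c], words)
    let words' := if rest = [] then p.2 ++ [String.mk p.1] else p.2
    pvLoopA rest s.1 s.2 p.1 words'

def parse_effect (effect : String) : List String :=
  pvLoopA effect.toList false false [] []

-- ===== PORT B =====
-- B's state update for the flags pass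
def pvUpdB (c : Char) (g ob : Bool) : Bool × Bool :=
  if c ∈ (['[', '<', '{', '('] : List Char) ∧ ob = false then (true, true)
  else if c ∈ ([']', '>', '}', ')'] : List Char) ∧ ob = true then (false, false)
  else if c = '"' ∧ ob = false then (!g, ob)
  else (g, ob)

-- pass 1: the grouped[i] flags
def pvFlags : List Char → Bool → Bool → List Bool
  | [], _, _ => []
  | c :: rest, g, ob =>
    let s := pvUpdB c g ob
    s.1 :: pvFlags rest s.1 s.2

-- _make_token: drop punctuation, uppercase
def pvMakeToken (seg : List Char) : String :=
  String.mk ((seg.filter (fun c => c ∉ (['.', ',', ';', ':', '!', '?'] : List Char))).map PySem.Chars.upperChar)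

-- pass 2: split at ungrouped spaces (keeping empty segments), plus the final append
def pvSplitB : List (Char × Bool) → List Char → List String
  | [], seg => [pvMakeToken seg]
  | (c, f) :: rest, seg =>
    if c = ' ' ∧ f = false then pvMakeToken seg :: pvSplitB rest []
    else pvSplitB rest (seg ++ [c])

def parse_effect_alt (effect : String) : List String :=
  if effect.toList = [] then []
  else pvSplitB (effect.toList.zip (pvFlags effect.toList false false)) []

-- ===== PRECONDITION & SPEC =====
def Spec_parse_effect (effect : String) (out : List String) : Prop := out = parse_effect_alt effect
instance (effect : String) (out : List String) : Decidable (Spec_parse_effect effect out) := by unfold Spec_parse_effect; infer_instance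

-- ===== CLAIM (what is proved, stated in full; the proofs are below) =====
def Claim_equal_parse_effect : Prop := ∀ (effect : String), Dom_parse_effect effect → Spec_parse_effect effect (parse_effect effect)

-- ===== LEMMAS AND PROOFS =====

-- the two update helpers are the same state transition
lemma pvUpd_eq (c : Char) (g ob : Bool) : pvUpdA c g ob = pvUpdB c g ob := rfl

-- processed characters of a segment (A's word contents for B's raw segment)
def pvTok (seg : List Char) : List Char :=
  (seg.filter (fun c => c ∉ (['.', ',', ';', ':', '!', '?'] : List Char))).map PySem.Chars.upperChar

lemma pvMakeToken_eq (seg : List Char) : pvMakeToken seg = String.mk (pvTok seg) := rfl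

lemma pvTok_snoc (seg : List Char) (c : Char) :
    pvTok (seg ++ [c])
      = pvTok seg ++ (if c ∈ (['.', ',', ';', ':', '!', '?'] : List Char) then [] else [PySem.Chars.upperChar c]) := by
  unfold pvTok
  rw [List.filter_append, List.map_append, List.filter_singleton]
  by_cases h : c ∈ (['.', ',', ';', ':', '!', '?'] : List Char) <;> simp [h]

-- one unfolding step of A's loop (the lets of pvLoopA zeta-reduced)
lemma pvLoopA_cons (c : Char) (rest : List Char) (g ob : Bool) (word : List Char) (words : List String) :
    pvLoopA (c :: rest) g ob word words =
      pvLoopA rest (pvUpdA c g ob).1 (pvUpdA c g ob).2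
        (if c = ' ' ∧ (pvUpdA c g ob).1 = false then ([], words ++ [String.mk word])
         else if c ∈ (['.', ',', ';', ':', '!', '?'] : List Char) then (word, words)
         else (word ++ [PySem.Chars.upperChar c], words)).1
        (if rest = [] then
           (if c = ' ' ∧ (pvUpdA c g ob).1 = false then ([], words ++ [String.mk word])
            else if c ∈ (['.', ',', ';', ':', '!', '?'] : List Char) then (word, words)
            else (word ++ [PySem.Chars.upperChar c], words)).2 ++
             [String.mk
               (if c = ' ' ∧ (pvUpdA c g ob).1 = false then ([], words ++ [String.mk word])
                else if c ∈ (['.', ',', ';', ':', '!', '?'] : List Char) then (word, words)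
                else (word ++ [PySem.Chars.upperChar c], words)).1]
         else
           (if c = ' ' ∧ (pvUpdA c g ob).1 = false then ([], words ++ [String.mk word])
            else if c ∈ (['.', ',', ';', ':', '!', '?'] : List Char) then (word, words)
            else (word ++ [PySem.Chars.upperChar c], words)).2) := rfl

-- one step of A's loop, phrased through B's raw segment
lemma pvStep (c : Char) (rest : List Char) (g ob : Bool) (seg : List Char) (words : List String) :
    pvLoopA (c :: rest) g ob (pvTok seg) words =
      if c = ' ' ∧ (pvUpdB c g ob).1 = false then
        pvLoopA rest (pvUpdB c g ob).1 (pvUpdB c g ob).2 (pvTok [])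
          (if rest = [] then (words ++ [pvMakeToken seg]) ++ [pvMakeToken []] else words ++ [pvMakeToken seg])
      else
        pvLoopA rest (pvUpdB c g ob).1 (pvUpdB c g ob).2 (pvTok (seg ++ [c]))
          (if rest = [] then words ++ [pvMakeToken (seg ++ [c])] else words) := by
  rw [pvLoopA_cons, pvUpd_eq]
  by_cases hsp : c = ' ' ∧ (pvUpdB c g ob).1 = false
  · obtain ⟨hc, hg⟩ := hsp
    subst hc
    simp [hg, pvMakeToken_eq, pvTok]
  · by_cases hp : c ∈ (['.', ',', ';', ':', '!', '?'] : List Char)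
    · simp [hsp, hp, pvMakeToken_eq, pvTok_snoc]
    · simp [hsp, hp, pvMakeToken_eq, pvTok_snoc]

-- loop invariant: A's running word is the processed form of B's raw current segment
lemma pvMain : ∀ (chars : List Char) (g ob : Bool) (seg : List Char) (words : List String),
    chars ≠ [] →
    pvLoopA chars g ob (pvTok seg) words
      = words ++ pvSplitB (chars.zip (pvFlags chars g ob)) seg := by
  intro chars
  induction chars with
  | nil => intro _ _ _ _ h; exact absurd rfl h
  | cons c rest ih =>
    intro g ob seg words _
    rw [pvStep]
    have hflags : pvFlags (c :: rest) g ob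
        = (pvUpdB c g ob).1 :: pvFlags rest (pvUpdB c g ob).1 (pvUpdB c g ob).2 := rfl
    rw [hflags]
    by_cases hsp : c = ' ' ∧ (pvUpdB c g ob).1 = false
    · obtain ⟨hc, hg⟩ := hsp
      subst hc
      have hsp : (' ' = ' ' ∧ (pvUpdB ' ' g ob).1 = false) := ⟨rfl, hg⟩
      cases rest with
      | nil => simp [hg, pvLoopA, pvSplitB, pvMakeToken_eq, pvTok]
      | cons d rest' =>
        rw [if_pos hsp]
        have h1 := ih (pvUpdB ' ' g ob).1 (pvUpdB ' ' g ob).2 [] (words ++ [pvMakeToken seg]) (by simp)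
        rw [hg] at h1
        simp only [List.zip_cons_cons, pvSplitB, hg, and_self, if_true]
        simp [h1]
    · cases rest with
      | nil => simp [hsp, pvLoopA, pvSplitB, pvMakeToken_eq]
      | cons d rest' =>
        rw [if_neg hsp]
        have h1 := ih (pvUpdB c g ob).1 (pvUpdB c g ob).2 (seg ++ [c]) words (by simp)
        simp [h1, pvSplitB, hsp]

-- ===== VERDICT (by name: the statement is the Claim_ definition above) =====
theorem parse_effect_spec : Claim_equal_parse_effect := by
  intro effect _
  unfold Spec_parse_effect parse_effect parse_effect_alt
  cases h : effect.toList with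
  | nil => simp [pvLoopA]
  | cons c rest =>
    have := pvMain (c :: rest) false false [] [] (by simp)
    simpa [pvTok] using this
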